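-- pv_equiv track=rewrite | github.com/Exploit467/Advent-of-Code | Advent_of_Code_2025/Advent_of_Code_2025_Day_3/Part_1.py | find_next_highest
-- ===== SOURCE A (Python) =====
-- def find_next_highest(string: str, digits_left: int, start_from: int) -> tuple[int, int]:
--     for i in range(9, 0, -1):
--         try:
--             idx = string.index(str(i), start_from)
--             if idx >= len(string) - digits_left:
--                 continue
--
--             return (string[idx], idx)
--
--         except ValueError:
--             continue
-- ===== SOURCE B (Python) =====
-- def find_next_highest(string, digits_left, start_from):
--     n = len(string)
--     lo = start_from if start_from >= 0 else max(n + start_from, 0)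
--     hi = min(n, n - digits_left)
--     best_c = None
--     best_i = -1
--     for i in range(lo, hi):
--         c = string[i]
--         if '1' <= c <= '9' and (best_c is None or c > best_c):
--             best_c, best_i = c, i
--     return (best_c, best_i) if best_c is not None else None
-- ===== Notes on version B (the rewrite author's own statement) =====
-- stated objective: alternative
-- what changed: replaces the nine per-digit str.index scans (digits 9 down to 1) by a single forward max-finding pass over the window [start, len-digits_left) that keeps the best digit character and its first index
import Mathlib
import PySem

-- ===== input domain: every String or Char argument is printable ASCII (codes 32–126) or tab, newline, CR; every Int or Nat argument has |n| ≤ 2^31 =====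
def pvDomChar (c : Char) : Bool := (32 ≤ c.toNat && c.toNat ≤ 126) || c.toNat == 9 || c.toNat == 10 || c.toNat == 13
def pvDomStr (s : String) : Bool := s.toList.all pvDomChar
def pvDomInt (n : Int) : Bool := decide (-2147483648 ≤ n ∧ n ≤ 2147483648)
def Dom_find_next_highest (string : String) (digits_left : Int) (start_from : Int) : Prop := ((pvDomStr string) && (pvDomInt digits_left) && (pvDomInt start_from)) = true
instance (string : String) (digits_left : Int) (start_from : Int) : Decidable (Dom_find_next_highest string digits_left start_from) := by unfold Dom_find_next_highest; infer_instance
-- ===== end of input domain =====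

-- B replaces A's nine per-digit str.index scans by a single forward max-finding pass over the window; same return value, an alternative decomposition of the same cost class.


-- ===== PORT A =====
-- for i in range(9, 0, -1): try: idx = string.index(str(i), start_from); if idx >= len(string) - digits_left: continue; return (string[idx], idx); except ValueError: continue
def loopA (cs : List Char) (digits_left : Int) (start_from : Int) : List Int → Option (String × Int)
  | [] => none
  | i :: rest =>
    let idx := PySem.Chars.findFrom cs (PySem.Int.toChars i) start_from
    if idx = -1 then loopA cs digits_left start_from rest
    else if (PySem.List.len cs) - digits_left ≤ idx then loopA cs digits_left start_from rest
    else some (String.ofList [PySem.List.pyGetD cs idx ' '], idx)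

def find_next_highest (string : String) (digits_left : Int) (start_from : Int) : Option (String × Int) :=
  loopA string.toList digits_left start_from (PySem.List.pyRange 9 0 (-1))

-- ===== PORT B =====
-- single forward pass keeping the best digit character seen and its first index
def altStep (cs : List Char) (best : Option (Char × Int)) (i : Int) : Option (Char × Int) :=
  let c := PySem.List.pyGetD cs i ' '
  if (('1' ≤ c && c ≤ '9') && (match best with | none => true | some (b, _) => decide (b < c))) then
    some (c, i)
  else best

def find_next_highest_alt (string : String) (digits_left : Int) (start_from : Int) : Option (String × Int) :=
  let cs := string.toList
  let n : Int := PySem.List.len cs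
  let lo : Int := if 0 ≤ start_from then start_from else max (n + start_from) 0
  let hi : Int := min n (n - digits_left)
  match (PySem.List.pyRange lo hi 1).foldl (altStep cs) none with
  | none => none
  | some (c, i) => some (String.ofList [c], i)


-- ===== PRECONDITION & SPEC =====
def Spec_find_next_highest (string : String) (digits_left : Int) (start_from : Int) (out : Option (String × Int)) : Prop := out = find_next_highest_alt string digits_left start_from
instance (string : String) (digits_left : Int) (start_from : Int) (out : Option (String × Int)) : Decidable (Spec_find_next_highest string digits_left start_from out) := by unfold Spec_find_next_highest; infer_instance

-- ===== CLAIM (what is proved, stated in full; the proofs are below) =====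
def Claim_equal_find_next_highest : Prop := ∀ (string : String) (digits_left : Int) (start_from : Int), Dom_find_next_highest string digits_left start_from → Spec_find_next_highest string digits_left start_from (find_next_highest string digits_left start_from)

-- ===== LEMMAS AND PROOFS =====
def digB (c : Char) : Bool := '1' ≤ c && c ≤ '9'
def atomF (i : Int) (c : Char) : Option (Char × Int) := if digB c then some (c, i) else none
def mergeOpt : Option (Char × Int) → Option (Char × Int) → Option (Char × Int)
  | b, none => b
  | none, some x => some x
  | some (cb, ib), some (c, i) => if cb < c then some (c, i) else some (cb, ib)
def maxScan : List (Int × Char) → Option (Char × Int)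
  | [] => none
  | (i, c) :: E => mergeOpt (atomF i c) (maxScan E)
def chainF (E : List (Int × Char)) : List Char → Option (Char × Int)
  | [] => none
  | c :: ds => match E.find? (fun p => p.2 == c) with
    | some p => some (c, p.1)
    | none => chainF E ds

theorem mergeOpt_none_left (x : Option (Char × Int)) : mergeOpt none x = x := by
  cases x <;> rfl

theorem mergeOpt_assoc (b x y : Option (Char × Int)) :
    mergeOpt (mergeOpt b x) y = mergeOpt b (mergeOpt x y) := by
  rcases y with _ | ⟨cy, iy⟩
  · rfl
  rcases x with _ | ⟨cx, ix⟩
  · rfl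
  rcases b with _ | ⟨cb, ib⟩
  · by_cases h : cx < cy <;> simp [mergeOpt, h]
  · by_cases h1 : cb < cx <;> by_cases h2 : cx < cy <;> by_cases h3 : cb < cy <;>
      simp [mergeOpt, h1, h2, h3] <;>
      first
        | rfl
        | exact absurd (h1.trans h2) h3
        | exact absurd (h3.trans_le (le_of_not_gt h2)) h1

theorem foldl_mergeOpt (E : List (Int × Char)) (b : Option (Char × Int)) :
    E.foldl (fun b p => mergeOpt b (atomF p.1 p.2)) b = mergeOpt b (maxScan E) := by
  induction E generalizing b with
  | nil => rfl
  | cons e E ih => cases e; simp [List.foldl, ih, maxScan, mergeOpt_assoc]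

theorem maxScan_none (E : List (Int × Char)) (h : maxScan E = none) :
    ∀ p ∈ E, digB p.2 = false := by
  induction E with
  | nil => intro p hp; simp at hp
  | cons e E ih =>
    obtain ⟨j, d⟩ := e
    intro p hp
    by_cases hd : digB d = true
    · exfalso
      have : maxScan ((j, d) :: E) = mergeOpt (some (d, j)) (maxScan E) := by
        simp [maxScan, atomF, hd]
      rw [this] at h
      rcases hE : maxScan E with _ | ⟨c', i'⟩ <;> rw [hE] at h <;> simp [mergeOpt] at h
      split at h <;> simp at h
    · have htail : maxScan ((j, d) :: E) = maxScan E := by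
        simp [maxScan, atomF, hd, mergeOpt_none_left]
      rw [htail] at h
      rcases List.mem_cons.mp hp with hh | hh
      · subst hh; simpa using hd
      · exact ih h p hh

theorem maxScan_some (E : List (Int × Char)) (c : Char) (i : Int)
    (h : maxScan E = some (c, i)) :
    digB c = true ∧ E.find? (fun p => p.2 == c) = some (i, c) ∧
      ∀ p ∈ E, digB p.2 = true → p.2 ≤ c := by
  induction E generalizing c i with
  | nil => simp [maxScan] at h
  | cons e E ih =>
    obtain ⟨j, d⟩ := e
    by_cases hd : digB d = true
    · have hh : maxScan ((j, d) :: E) = mergeOpt (some (d, j)) (maxScan E) := by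
        simp [maxScan, atomF, hd]
      rw [hh] at h
      rcases hE : maxScan E with _ | ⟨c', i'⟩ <;> rw [hE] at h
      · -- tail empty of digits
        simp only [mergeOpt] at h
        obtain ⟨hc, hi⟩ := Prod.mk.inj (Option.some.inj h)
        subst hc; subst hi
        have h0 := maxScan_none E hE
        refine ⟨hd, by simp, ?_⟩
        intro p hp hpd
        rcases List.mem_cons.mp hp with hm | hm
        · subst hm; exact le_refl _
        · exact absurd (h0 p hm) (by simp [hpd])
      · obtain ⟨hd', hf', hm'⟩ := ih c' i' hE
        simp only [mergeOpt] at h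
        split_ifs at h with hlt
        · -- result from tail, d < c
          obtain ⟨hc, hi⟩ := Prod.mk.inj (Option.some.inj h)
          subst hc; subst hi
          refine ⟨hd', ?_, ?_⟩
          · rw [List.find?_cons]
            have : (d == c') = false := by simp [ne_of_lt hlt]
            simp only [this]
            exact hf'
          · intro p hp hpd
            rcases List.mem_cons.mp hp with hm | hm
            · subst hm; exact le_of_lt hlt
            · exact hm' p hm hpd
        · -- result the head
          obtain ⟨hc, hi⟩ := Prod.mk.inj (Option.some.inj h)
          subst hc; subst hi
          refine ⟨hd, by simp, ?_⟩
          intro p hp hpd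
          rcases List.mem_cons.mp hp with hm | hm
          · subst hm; exact le_refl _
          · exact le_trans (hm' p hm hpd) (le_of_not_gt hlt)
    · have htail : maxScan ((j, d) :: E) = maxScan E := by
        simp [maxScan, atomF, hd, mergeOpt_none_left]
      rw [htail] at h
      obtain ⟨hd', hf', hm'⟩ := ih c i h
      refine ⟨hd', ?_, ?_⟩
      · rw [List.find?_cons]
        have : (d == c) = false := by
          by_contra hcc
          simp only [Bool.not_eq_false, beq_iff_eq] at hcc
          rw [hcc] at hd; exact hd hd'
        simp only [this]
        exact hf'
      · intro p hp hpd
        rcases List.mem_cons.mp hp with hm | hm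
        · subst hm; exact absurd hpd (by simp [hd])
        · exact hm' p hm hpd

theorem chain_good (E : List (Int × Char)) (ds : List Char)
    (hpw : ds.Pairwise (· > ·)) (hcov : ∀ p ∈ E, digB p.2 = true → p.2 ∈ ds) :
    (chainF E ds = none → ∀ p ∈ E, digB p.2 = false) ∧
    (∀ c i, chainF E ds = some (c, i) → digB c = true →
      digB c = true ∧ E.find? (fun p => p.2 == c) = some (i, c) ∧
        ∀ p ∈ E, digB p.2 = true → p.2 ≤ c) := by
  induction ds with
  | nil =>
    refine ⟨fun _ p hp => ?_, fun c i h => by simp [chainF] at h⟩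
    by_contra hpd
    simp only [Bool.not_eq_false] at hpd
    exact absurd (hcov p hp hpd) (List.not_mem_nil)
  | cons d ds ih =>
    have hdds : ∀ a ∈ ds, a < d := by
      intro a ha
      exact (List.pairwise_cons.mp hpw).1 a ha
    cases hf : E.find? (fun p => p.2 == d) with
    | some p0 =>
      have hstep : chainF E (d :: ds) = some (d, p0.1) := by
        simp [chainF, hf]
      refine ⟨fun h => ?_, fun c i h hdig => ?_⟩
      · rw [hstep] at h; cases h
      rw [hstep] at h
      obtain ⟨hc, hi⟩ := Prod.mk.inj (Option.some.inj h)
      subst hc; subst hi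
      have hp02 : p0.2 = d := by simpa using List.find?_some hf
      refine ⟨hdig, ?_, ?_⟩
      · have : p0 = (p0.1, d) := by rw [← hp02]
        rw [← this]; exact hf
      · intro p hp hpd
        rcases List.mem_cons.mp (hcov p hp hpd) with hm | hm
        · exact le_of_eq hm
        · exact le_of_lt (hdds _ hm)
    | none =>
      have hstep : chainF E (d :: ds) = chainF E ds := by
        simp [chainF, hf]
      have hne : ∀ p ∈ E, ¬ (p.2 = d) := by
        intro p hp
        simpa using List.find?_eq_none.mp hf p hp
      have hcov' : ∀ p ∈ E, digB p.2 = true → p.2 ∈ ds := by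
        intro p hp hpd
        rcases List.mem_cons.mp (hcov p hp hpd) with hm | hm
        · exact absurd hm (hne p hp)
        · exact hm
      have := ih (List.pairwise_cons.mp hpw).2 hcov'
      rw [hstep]
      exact this

theorem dig_mem_digits (c : Char) (h : digB c = true) :
    c ∈ ['9','8','7','6','5','4','3','2','1'] := by
  obtain ⟨h1, h2⟩ := Bool.and_eq_true_iff.mp h
  have h1' : 49 ≤ c.val.toNat := Char.le_def.mp (by simpa using h1)
  have h2' : c.val.toNat ≤ 57 := Char.le_def.mp (by simpa using h2)
  have hv : c.val = 49 ∨ c.val = 50 ∨ c.val = 51 ∨ c.val = 52 ∨ c.val = 53 ∨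
      c.val = 54 ∨ c.val = 55 ∨ c.val = 56 ∨ c.val = 57 := by
    interval_cases h : c.val.toNat <;> simp_all [← UInt32.toNat_inj]
  rcases hv with h|h|h|h|h|h|h|h|h <;> simp [Char.ext_iff, h]

theorem chainF_some_mem (E : List (Int × Char)) :
    ∀ (ds : List Char) (c : Char) (i : Int), chainF E ds = some (c, i) → c ∈ ds := by
  intro ds
  induction ds with
  | nil => intro c i h; cases h
  | cons d ds ih =>
    intro c i h
    rcases hf : E.find? (fun p => p.2 == d) with _ | p0 <;> rw [chainF, hf] at h
    · exact List.mem_cons_of_mem _ (ih c i h)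
    · obtain ⟨hc, -⟩ := Prod.mk.inj (Option.some.inj h)
      subst hc
      exact List.mem_cons_self

theorem chain_eq_maxScan (E : List (Int × Char)) :
    chainF E ['9','8','7','6','5','4','3','2','1'] = maxScan E := by
  have hcg := chain_good E ['9','8','7','6','5','4','3','2','1'] (by decide)
    (fun p _ hpd => dig_mem_digits p.2 hpd)
  cases h1 : chainF E ['9','8','7','6','5','4','3','2','1'] with
  | none =>
    cases h2 : maxScan E with
    | none => rfl
    | some ci =>
      obtain ⟨c, i⟩ := ci
      obtain ⟨hd, hfind, _⟩ := maxScan_some E c i h2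
      have hmem := List.mem_of_find?_eq_some hfind
      exact absurd (hcg.1 h1 _ hmem) (by simpa using hd)
  | some ci =>
    obtain ⟨c, i⟩ := ci
    have hdig : digB c = true := by
      rcases List.mem_cons.mp (chainF_some_mem E _ c i h1) with rfl | hm
      · decide
      rcases List.mem_cons.mp hm with rfl | hm
      · decide
      rcases List.mem_cons.mp hm with rfl | hm
      · decide
      rcases List.mem_cons.mp hm with rfl | hm
      · decide
      rcases List.mem_cons.mp hm with rfl | hm
      · decide
      rcases List.mem_cons.mp hm with rfl | hm
      · decide
      rcases List.mem_cons.mp hm with rfl | hm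
      · decide
      rcases List.mem_cons.mp hm with rfl | hm
      · decide
      rcases List.mem_cons.mp hm with rfl | hm
      · decide
      cases hm
    obtain ⟨_, hfind, hmax⟩ := hcg.2 c i h1 hdig
    cases h2 : maxScan E with
    | none =>
      have hmem := List.mem_of_find?_eq_some hfind
      exact absurd (maxScan_none E h2 _ hmem) (by simpa using hdig)
    | some ci' =>
      obtain ⟨c', i'⟩ := ci'
      obtain ⟨hd', hfind', hmax'⟩ := maxScan_some E c' i' h2
      have hcc : c = c' := by
        have hm1 := List.mem_of_find?_eq_some hfind
        have hm2 := List.mem_of_find?_eq_some hfind'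
        exact le_antisymm (hmax' _ hm1 hdig) (hmax _ hm2 hd')
      subst hcc
      rw [hfind'] at hfind
      obtain ⟨hi, -⟩ := Prod.mk.inj (Option.some.inj hfind)
      rw [hi]

theorem singleton_prefix_iff (c : Char) (l : List Char) : [c] <+: l ↔ l.head? = some c := by
  cases l with
  | nil => simp
  | cons a t =>
    constructor
    · rintro ⟨s, hs⟩
      simp only [List.singleton_append] at hs
      cases hs
      simp
    · intro h
      simp only [List.head?_cons, Option.some.injEq] at h
      subst h
      exact ⟨t, rfl⟩

theorem singleton_infix_iff (c : Char) (l : List Char) : [c] <:+: l ↔ c ∈ l := by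
  constructor
  · rintro ⟨s, t, hst⟩
    subst hst; simp
  · intro h
    obtain ⟨s, t, hst⟩ := List.append_of_mem h
    exact ⟨s, t, by simp [hst]⟩

theorem find_singleton (l : List Char) (c : Char) :
    PySem.Chars.find l [c] =
      match l.idxOf? c with
      | some k => (k : Int)
      | none => -1 := by
  have hz : ((0 : Nat) : Int) = (0 : Int) := rfl
  cases hio : l.idxOf? c with
  | none =>
    have hnm : c ∉ l := List.idxOf?_eq_none_iff.mp hio
    have := (PySem.Chars.findFrom_natCast_eq_neg_one_iff l [c] 0 (Nat.zero_le _)).mpr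
      (by simpa [singleton_infix_iff] using hnm)
    simpa using this
  | some k =>
    obtain ⟨hk, hgk, hmin⟩ := List.idxOf?_eq_some_iff.mp hio
    have hmem : c ∈ l := by exact hgk ▸ List.getElem_mem hk
    have hne : PySem.Chars.findFrom l [c] ((0 : Nat) : Int) ≠ -1 := by
      rw [Ne, PySem.Chars.findFrom_natCast_eq_neg_one_iff l [c] 0 (Nat.zero_le _)]
      simpa [singleton_infix_iff] using hmem
    obtain ⟨hge, hpre, hmin'⟩ := PySem.Chars.findFrom_natCast_spec l [c] 0 (Nat.zero_le _) hne
    set f := PySem.Chars.findFrom l [c] ((0 : Nat) : Int) with hf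
    have hj : l[f.toNat]? = some c := by
      rw [← List.head?_drop]
      exact (singleton_prefix_iff c _).mp hpre
    have hjlt : f.toNat < l.length := (List.getElem?_eq_some_iff.mp hj).1
    have hkj : k = f.toNat := by
      rcases lt_trichotomy k f.toNat with h | h | h
      · exact absurd ((singleton_prefix_iff c _).mpr (by rw [List.head?_drop]; exact List.getElem?_eq_some_iff.mpr ⟨hk, hgk⟩))
          (hmin' k (Nat.zero_le _) h)
      · exact h
      · exact absurd ((List.getElem?_eq_some_iff.mp hj).2) (by
          have := hmin f.toNat h
          simpa using this)
    have hfval : f = (k : Int) := by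
      rw [hkj]
      exact (Int.toNat_of_nonneg (by simpa using hge)).symm
    have : PySem.Chars.find l [c] = f := by simp [hf]
    rw [this, hfval]

theorem findFrom_singleton (cs : List Char) (c : Char) (sf : Int) :
    PySem.Chars.findFrom cs [c] sf none =
      match (cs.drop (PySem.List.clampIdx cs.length sf)).idxOf? c with
      | some k => ((PySem.List.clampIdx cs.length sf : Nat) : Int) + k
      | none => -1 := by
  simp only [PySem.Chars.findFrom]
  split_ifs with h1 h2 h3 h4 h5 h6 h7 h8
  · exfalso; omega
  · -- sf < 0, sf+n < 0, find from 0 fails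
    have hc : PySem.List.clampIdx cs.length sf = 0 := by
      simp only [PySem.List.clampIdx]
      split_ifs <;> omega
    rw [find_singleton] at h4
    rw [hc]
    simp only [Int.toNat_zero, List.drop_zero, Int.toNat_natCast, List.take_length] at h4 ⊢
    cases hio : cs.idxOf? c with
    | none => rfl
    | some k => rw [hio] at h4; simp at h4
  · have hc : PySem.List.clampIdx cs.length sf = 0 := by
      simp only [PySem.List.clampIdx]
      split_ifs <;> omega
    rw [find_singleton] at h4
    rw [hc]
    simp only [Int.toNat_zero, List.drop_zero, Int.toNat_natCast, List.take_length] at h4 ⊢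
    rw [find_singleton]
    cases hio : cs.idxOf? c with
    | none => rw [hio] at h4; simp at h4
    | some k => simp
  · exfalso; omega
  · -- sf < 0, 0 ≤ sf+n, miss
    have hc : PySem.List.clampIdx cs.length sf = (sf + (cs.length : Int)).toNat := by
      simp only [PySem.List.clampIdx]
      split_ifs <;> omega
    rw [find_singleton] at h6
    rw [hc]
    simp only [Int.toNat_natCast, List.take_length] at h6 ⊢
    cases hio : (cs.drop (sf + (cs.length : Int)).toNat).idxOf? c with
    | none => rfl
    | some k => rw [hio] at h6; simp at h6
  · have hc : PySem.List.clampIdx cs.length sf = (sf + (cs.length : Int)).toNat := by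
      simp only [PySem.List.clampIdx]
      split_ifs <;> omega
    rw [find_singleton] at h6
    rw [hc]
    simp only [Int.toNat_natCast, List.take_length] at h6 ⊢
    rw [find_singleton]
    cases hio : (cs.drop (sf + (cs.length : Int)).toNat).idxOf? c with
    | none => rw [hio] at h6; simp at h6
    | some k => simp <;> omega
  · -- 0 ≤ sf, n < sf : -1, window empty
    have hc : PySem.List.clampIdx cs.length sf = cs.length := by
      simp only [PySem.List.clampIdx]
      split_ifs <;> omega
    rw [hc, List.drop_length]
    rfl
  · -- 0 ≤ sf ≤ n, miss
    have hc : PySem.List.clampIdx cs.length sf = sf.toNat := by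
      simp only [PySem.List.clampIdx]
      split_ifs <;> omega
    rw [find_singleton] at h8
    rw [hc]
    simp only [Int.toNat_natCast, List.take_length] at h8 ⊢
    cases hio : (cs.drop sf.toNat).idxOf? c with
    | none => rfl
    | some k => rw [hio] at h8; simp at h8
  · have hc : PySem.List.clampIdx cs.length sf = sf.toNat := by
      simp only [PySem.List.clampIdx]
      split_ifs <;> omega
    rw [find_singleton] at h8
    rw [hc]
    simp only [Int.toNat_natCast, List.take_length] at h8 ⊢
    rw [find_singleton]
    cases hio : (cs.drop sf.toNat).idxOf? c with
    | none => rw [hio] at h8; simp at h8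
    | some k => simp <;> omega

def loNof (cs : List Char) (sf : Int) : Nat := PySem.List.clampIdx cs.length sf
def hiNof (cs : List Char) (dl : Int) : Nat := (min (cs.length : Int) ((cs.length : Int) - dl)).toNat
def winW (cs : List Char) (dl sf : Int) : List Char := (cs.take (hiNof cs dl)).drop (loNof cs sf)
def winE (cs : List Char) (dl sf : Int) : List (Int × Char) :=
  PySem.List.enumerate (winW cs dl sf) ((loNof cs sf : Nat) : Int)
def wrapO : Option (Char × Int) → Option (String × Int)
  | none => none
  | some (c, i) => some (String.ofList [c], i)

theorem clampIdx_int (n : Nat) (i : Int) :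
    ((PySem.List.clampIdx n i : Nat) : Int) = if i < 0 then max ((n : Int) + i) 0 else min i n := by
  simp only [PySem.List.clampIdx]
  split_ifs <;> omega

theorem find?_enumerate (W : List Char) (c : Char) :
    ∀ (s : Int), (PySem.List.enumerate W s).find? (fun p => p.2 == c) =
      (W.idxOf? c).map (fun k => (s + (k : Int), c)) := by
  induction W with
  | nil => intro s; simp [PySem.List.enumerate_nil]
  | cons a W ih =>
    intro s
    rw [PySem.List.enumerate_cons, List.find?_cons]
    by_cases hac : a = c
    · subst hac
      simp [List.idxOf?_cons]
    · have hb : (a == c) = false := by simp [hac]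
      simp only [hb]
      rw [ih (s + 1), List.idxOf?_cons, hb]
      cases hio : W.idxOf? c with
      | none => simp
      | some k =>
        simp [Prod.ext_iff]
        omega

theorem window_take_drop (cs : List Char) (dl sf : Int) :
    winW cs dl sf = (cs.drop (loNof cs sf)).take (hiNof cs dl - loNof cs sf) := by
  simp [winW, List.drop_take]

theorem A_step (cs : List Char) (dl sf : Int) (c : Char) (cont : Option (String × Int)) :
    (if PySem.Chars.findFrom cs [c] sf = -1 then cont
     else if (PySem.List.len cs) - dl ≤ PySem.Chars.findFrom cs [c] sf then cont
     else some (String.ofList [PySem.List.pyGetD cs (PySem.Chars.findFrom cs [c] sf) ' '],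
                PySem.Chars.findFrom cs [c] sf))
    = match (winE cs dl sf).find? (fun p => p.2 == c) with
      | some p => some (String.ofList [c], p.1)
      | none => cont := by
  rw [winE, find?_enumerate, findFrom_singleton, window_take_drop]
  simp only [PySem.List.len_eq]
  set loN := loNof cs sf with hlo
  have hloc : ((loN : Nat) : Int) = if sf < 0 then max ((cs.length : Int) + sf) 0 else min sf (cs.length : Int) :=
    clampIdx_int cs.length sf
  set hiN := hiNof cs dl with hhi
  have hhic : hiN = (min (cs.length : Int) ((cs.length : Int) - dl)).toNat := rfl
  rw [show PySem.List.clampIdx cs.length sf = loN from rfl]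
  cases ho : (cs.drop loN).idxOf? c with
  | none =>
    have hnm : c ∉ cs.drop loN := List.idxOf?_eq_none_iff.mp ho
    have hwnone : ((cs.drop loN).take (hiN - loN)).idxOf? c = none := by
      rw [List.idxOf?_eq_none_iff]
      intro hmem
      exact hnm (List.mem_of_mem_take hmem)
    rw [hwnone]
    simp
  | some k =>
    obtain ⟨hk, hgk, hmin⟩ := List.idxOf?_eq_some_iff.mp ho
    have hklen : loN + k < cs.length := by
      have := hk; simp [List.length_drop] at this; omega
    have hgabs : cs[loN + k]'hklen = c := by
      rw [← hgk]; simp [List.getElem_drop]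
    have hne1 : ¬ ((loN : Int) + (k : Int) = -1) := by omega
    rw [if_neg hne1]
    by_cases hbd : (cs.length : Int) - dl ≤ (loN : Int) + (k : Int)
    · rw [if_pos hbd]
      have hwnone : ((cs.drop loN).take (hiN - loN)).idxOf? c = none := by
        rw [List.idxOf?_eq_none_iff]
        intro hmem
        obtain ⟨j, hj, hgj⟩ := List.getElem_of_mem hmem
        have hjlen : j < hiN - loN := by
          have := hj; simp [List.length_take, List.length_drop] at this; omega
        have hgj' : (cs.drop loN)[j]'(by simp [List.length_drop]; omega) = c := by
          rw [← hgj]; simp [List.getElem_take]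
        have hkj : ¬ j < k := fun hlt => hmin j hlt hgj'
        omega
      rw [hwnone]
      simp
    · rw [if_neg hbd]
      have hkwin : k < hiN - loN := by omega
      have hwlen : k < ((cs.drop loN).take (hiN - loN)).length := by
        simp [List.length_take, List.length_drop]; omega
      have hwsome : ((cs.drop loN).take (hiN - loN)).idxOf? c = some k := by
        rw [List.idxOf?_eq_some_iff]
        refine ⟨hwlen, by simpa [List.getElem_take] using hgk, ?_⟩
        intro j hj
        have := hmin j hj
        simpa [List.getElem_take] using this
      rw [hwsome]
      have hgetd : PySem.List.pyGetD cs ((loN : Int) + (k : Int)) ' ' = c := by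
        have : ((loN : Int) + (k : Int)) = ((loN + k : Nat) : Int) := by push_cast; ring
        rw [this, PySem.List.pyGetD_natCast]
        simp [List.getD_eq_getElem?_getD, List.getElem?_eq_getElem hklen, hgabs]
      simp [hgetd]

theorem loopA_chain (cs : List Char) (dl sf : Int) :
    ∀ (is : List Int),
      (∀ i ∈ is, PySem.Int.toChars i = [(PySem.Int.toChars i).headD ' ']) →
      loopA cs dl sf is =
        wrapO (chainF (winE cs dl sf) (is.map (fun i => (PySem.Int.toChars i).headD ' '))) := by
  intro is
  induction is with
  | nil => intro _; rfl
  | cons i is ih =>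
    intro his
    have hc := his i List.mem_cons_self
    simp only [loopA]
    rw [hc]
    rw [A_step cs dl sf ((PySem.Int.toChars i).headD ' ') (loopA cs dl sf is)]
    rw [ih (fun j hj => his j (List.mem_cons_of_mem _ hj))]
    simp only [List.map_cons, chainF]
    cases hf : (winE cs dl sf).find? (fun p => p.2 == (PySem.Int.toChars i).headD ' ') <;>
      simp [wrapO]

theorem altStep_merge (cs : List Char) (b : Option (Char × Int)) (i : Int) :
    altStep cs b i = mergeOpt b (atomF i (PySem.List.pyGetD cs i ' ')) := by
  simp only [altStep, atomF]
  rw [show ('1' ≤ PySem.List.pyGetD cs i ' ' && PySem.List.pyGetD cs i ' ' ≤ '9')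
      = digB (PySem.List.pyGetD cs i ' ') from rfl]
  cases hb : digB (PySem.List.pyGetD cs i ' ') <;> rcases b with _ | ⟨cb, ib⟩
  all_goals
    first
      | rfl
      | simp [mergeOpt]

theorem bfold_eq (cs : List Char) :
    ∀ (W pre suf : List Char) (b : Option (Char × Int)), cs = pre ++ (W ++ suf) →
      (PySem.List.pyRange (pre.length : Int) ((pre.length : Int) + (W.length : Int)) 1).foldl
          (altStep cs) b
        = (PySem.List.enumerate W (pre.length : Int)).foldl
            (fun b p => mergeOpt b (atomF p.1 p.2)) b := by
  intro W
  induction W with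
  | nil =>
    intro pre suf b _
    rw [PySem.List.pyRange_one_eq_nil (by simp), PySem.List.enumerate_nil]
    rfl
  | cons a W ih =>
    intro pre suf b hcs
    have hlt : (pre.length : Int) < (pre.length : Int) + ((a :: W).length : Int) := by
      simp
    rw [PySem.List.pyRange_one_cons hlt]
    rw [List.foldl_cons, PySem.List.enumerate_cons, List.foldl_cons]
    have hget : PySem.List.pyGetD cs (pre.length : Int) ' ' = a := by
      rw [PySem.List.pyGetD_natCast, hcs]
      simp [List.getD_eq_getElem?_getD]
    have hstep : altStep cs b (pre.length : Int) =
        mergeOpt b (atomF (pre.length : Int) a) := by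
      rw [altStep_merge, hget]
    rw [hstep]
    have hcs' : cs = (pre ++ [a]) ++ (W ++ suf) := by simp [hcs]
    have hib := ih (pre ++ [a]) suf (mergeOpt b (atomF (pre.length : Int) a)) hcs'
    have hb1 : ((pre ++ [a]).length : Int) = (pre.length : Int) + 1 := by simp
    rw [hb1] at hib
    have hb2 : (pre.length : Int) + 1 + (W.length : Int) =
        (pre.length : Int) + ((a :: W).length : Int) := by simp; ring
    rw [hb2] at hib
    rw [hib]

theorem main_eq (string : String) (digits_left : Int) (start_from : Int) :
    find_next_highest string digits_left start_from =
      find_next_highest_alt string digits_left start_from := by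
  set cs := string.toList with hcs
  set dl := digits_left
  set sf := start_from
  -- A side
  have hA : find_next_highest string dl sf = wrapO (maxScan (winE cs dl sf)) := by
    rw [find_next_highest]
    rw [show PySem.List.pyRange 9 0 (-1) = ([9,8,7,6,5,4,3,2,1] : List Int) from by decide]
    rw [loopA_chain cs dl sf [9,8,7,6,5,4,3,2,1] (by decide)]
    rw [show ([9,8,7,6,5,4,3,2,1] : List Int).map (fun i => (PySem.Int.toChars i).headD ' ')
        = (['9','8','7','6','5','4','3','2','1'] : List Char) from by decide]
    rw [chain_eq_maxScan]
  -- B side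
  have hB : find_next_highest_alt string dl sf = wrapO (maxScan (winE cs dl sf)) := by
    rw [find_next_highest_alt]
    simp only [PySem.List.len_eq, ← hcs]
    set n : Int := (cs.length : Int) with hn
    set lo : Int := if 0 ≤ sf then sf else max (n + sf) 0 with hlo
    set hi : Int := min n (n - dl) with hhi
    have hloc : ((loNof cs sf : Nat) : Int) = if sf < 0 then max (n + sf) 0 else min sf n :=
      clampIdx_int cs.length sf
    have hhic : (hiNof cs dl : Nat) = hi.toNat := rfl
    have hkey : (PySem.List.pyRange lo hi 1).foldl (altStep cs) none
        = maxScan (winE cs dl sf) := by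
      rcases le_or_gt hi lo with hle | hgt
      · -- empty window
        rw [PySem.List.pyRange_one_eq_nil hle]
        have hWnil : winW cs dl sf = [] := by
          rw [window_take_drop]
          have : hiNof cs dl - loNof cs sf = 0 := by
            simp only [hiNof, loNof]
            rw [show PySem.List.clampIdx cs.length sf = loNof cs sf from rfl]
            omega
          simp [this]
        simp [winE, hWnil, PySem.List.enumerate_nil, maxScan, List.foldl_nil]
      · -- nonempty range
        have hlo0 : 0 ≤ lo := by rw [hlo]; split_ifs <;> omega
        have hhin : hi ≤ n := by omega
        have hloeq : lo = ((loNof cs sf : Nat) : Int) := by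
          rw [hloc, hlo]
          split_ifs <;> omega
        have hhieq : hi = ((hiNof cs dl : Nat) : Int) := by
          rw [hhic]; omega
        have hlole : loNof cs sf ≤ hiNof cs dl := by omega
        have hhile : hiNof cs dl ≤ cs.length := by omega
        set loN := loNof cs sf
        set hiN := hiNof cs dl
        set W := winW cs dl sf with hW
        have hpre : cs = cs.take loN ++ (W ++ cs.drop hiN) := by
          have h1 : cs.take loN ++ W = cs.take hiN := by
            rw [hW, winW]
            rw [show cs.take loN = (cs.take hiN).take loN by
              rw [List.take_take]; congr 1; omega]
            exact List.take_append_drop _ _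
          calc cs = cs.take hiN ++ cs.drop hiN := (List.take_append_drop _ _).symm
            _ = (cs.take loN ++ W) ++ cs.drop hiN := by rw [h1]
            _ = cs.take loN ++ (W ++ cs.drop hiN) := by rw [List.append_assoc]
        have hlen : (cs.take loN).length = loN := by
          rw [List.length_take]; omega
        have hWlen : W.length = hiN - loN := by
          rw [hW, window_take_drop]
          simp [List.length_take, List.length_drop]
          omega
        have hfold := bfold_eq cs W (cs.take loN) (cs.drop hiN) none hpre
        rw [hlen] at hfold
        have hrange : lo = ((loN : Nat) : Int) ∧ hi = ((loN : Nat) : Int) + ((W.length : Nat) : Int) := by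
          constructor
          · exact hloeq
          · rw [hWlen, hhieq]; omega
        rw [hrange.1, hrange.2, hfold]
        rw [winE, ← hW, foldl_mergeOpt, mergeOpt_none_left]
    rw [hkey]
    cases hms : maxScan (winE cs dl sf) with
    | none => simp [wrapO]
    | some p => obtain ⟨c, i⟩ := p; simp [wrapO]
  rw [hA, hB]

-- ===== VERDICT (by name: the statement is the Claim_ definition above) =====
theorem find_next_highest_spec : Claim_equal_find_next_highest := by
  intro string digits_left start_from _
  unfold Spec_find_next_highest
  exact main_eq string digits_left start_from
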